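-- pv_equiv track=rewrite | github.com/shantanuhallur/practiceProblems | practice/a.py | calculate_distances_with_wraparound
-- ===== SOURCE A (Python) =====
-- def calculate_distances_with_wraparound(keyboard_matrix, start_position, word):
--     result = []
--     current_position = start_position
--
--     # Create a dictionary to store the position of each character
--     char_positions = {}
--     for row_index, row in enumerate(keyboard_matrix):
--         for col_index, char in enumerate(row):
--             char_positions[char] = (row_index, col_index)
--
--     def get_wrapped_position(row, col):
--         # Helper function to get the wrapped position for both rows and columns
--         wrapped_row = row % len(keyboard_matrix)
--         wrapped_col = col % len(keyboard_matrix[wrapped_row])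
--         return wrapped_row, wrapped_col
--
--     for char in word:
--         if char not in char_positions:
--             raise ValueError(f"Character '{char}' not found in the keyboard matrix.")
--
--         next_position = char_positions[char]
--         wrapped_next_position = get_wrapped_position(*next_position)
--
--         # Calculate minimum vertical and horizontal distances considering wraparound
--         distance = (
--             min((next_position[0] - current_position[0]) % len(keyboard_matrix),
--                 (wrapped_next_position[0] - current_position[0]) % len(keyboard_matrix)),
--             min(next_position[1] - current_position[1], wrapped_next_position[1] - current_position[1])
--         )
--         result.append(distance)
--         current_position = next_position
--
--     return result
-- ===== SOURCE B (Python) =====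
-- def calculate_distances_with_wraparound(keyboard_matrix, start_position, word):
--     n = len(keyboard_matrix)
--     result = []
--     cur_row, cur_col = start_position
--     for ch in word:
--         found = None
--         for r, row in enumerate(keyboard_matrix):
--             for c, cell in enumerate(row):
--                 if cell == ch:
--                     found = (r, c)  # last occurrence wins
--         if found is None:
--             raise ValueError(f"Character '{ch}' not found in the keyboard matrix.")
--         nr, nc = found
--         result.append(((nr - cur_row) % n, nc - cur_col))
--         cur_row, cur_col = nr, nc
--     return result
-- ===== Notes on version B (the rewrite author's own statement) =====
-- stated objective: simpler
-- what changed: Drops the precomputed char-position dict and the redundant wrap/min machinery: for each word character B scans the matrix keeping the last matching cell, then appends ((next_row-cur_row) % n, next_col-cur_col) directly, since wrapping an in-range position is a no-op.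
import Mathlib
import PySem

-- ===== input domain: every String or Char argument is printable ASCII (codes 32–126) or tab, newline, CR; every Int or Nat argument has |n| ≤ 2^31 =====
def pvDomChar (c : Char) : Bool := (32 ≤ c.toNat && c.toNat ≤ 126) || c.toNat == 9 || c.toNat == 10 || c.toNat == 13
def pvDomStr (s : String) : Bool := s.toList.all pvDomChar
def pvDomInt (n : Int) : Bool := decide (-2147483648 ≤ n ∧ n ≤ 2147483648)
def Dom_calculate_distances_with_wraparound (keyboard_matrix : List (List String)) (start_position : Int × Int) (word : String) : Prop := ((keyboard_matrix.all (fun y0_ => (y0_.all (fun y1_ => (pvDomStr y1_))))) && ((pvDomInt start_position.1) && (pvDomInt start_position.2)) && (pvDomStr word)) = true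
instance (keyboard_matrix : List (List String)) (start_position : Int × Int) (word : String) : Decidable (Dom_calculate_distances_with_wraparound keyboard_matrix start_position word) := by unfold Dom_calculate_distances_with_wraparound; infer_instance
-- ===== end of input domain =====

-- B drops A's precomputed char-position dict and the redundant wrap/min computations:
-- per word character it scans the matrix keeping the LAST matching cell and appends
-- ((next_row - cur_row) % n, next_col - cur_col) directly.

-- ===== PORT A =====
def calculate_distances_with_wraparound (keyboard_matrix : List (List String)) (start_position : Int × Int) (word : String) : List (Int × Int) :=
  let char_positions : PySem.Dict String (Int × Int) :=
    (PySem.List.enumerate keyboard_matrix).foldl (fun d p =>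
      (PySem.List.enumerate p.2).foldl (fun d q => d.insert q.2 (p.1, q.1)) d) PySem.Dict.empty
  let get_wrapped_position : Int → Int → Int × Int := fun row col =>
    let wrapped_row := PySem.Int.mod row (keyboard_matrix.length : Int)
    let wrapped_col := PySem.Int.mod col (((PySem.List.pyGet? keyboard_matrix wrapped_row).getD []).length : Int)
    (wrapped_row, wrapped_col)
  (word.toList.foldl (fun st ch =>
    match char_positions.get? (String.mk [ch]) with
    | none => st        -- Python raises ValueError here; such inputs are excluded by Pre_
    | some np =>
      let wnp := get_wrapped_position np.1 np.2
      let distance := (min (PySem.Int.mod (np.1 - st.1.1) (keyboard_matrix.length : Int))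
                           (PySem.Int.mod (wnp.1 - st.1.1) (keyboard_matrix.length : Int)),
                       min (np.2 - st.1.2) (wnp.2 - st.1.2))
      (np, st.2 ++ [distance])) (start_position, ([] : List (Int × Int)))).2

-- ===== PORT B =====
def calculate_distances_with_wraparound_alt (keyboard_matrix : List (List String)) (start_position : Int × Int) (word : String) : List (Int × Int) :=
  let n : Int := (keyboard_matrix.length : Int)
  (word.toList.foldl (fun st ch =>
    let found := (PySem.List.enumerate keyboard_matrix).foldl (fun acc p =>
        (PySem.List.enumerate p.2).foldl (fun acc q =>
          if q.2 = String.mk [ch] then some (p.1, q.1) else acc) acc) (none : Option (Int × Int))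
    match found with
    | none => st        -- Python raises ValueError here; such inputs are excluded by Pre_
    | some np => (np, st.2 ++ [(PySem.Int.mod (np.1 - st.1.1) n, np.2 - st.1.2)]))
    (start_position, ([] : List (Int × Int)))).2

-- ===== PRECONDITION & SPEC =====
-- Pre_ excludes exactly the inputs on which A (and B) raises ValueError: a word character
-- that occurs in no cell of the keyboard matrix.
def Pre_calculate_distances_with_wraparound (keyboard_matrix : List (List String)) (start_position : Int × Int) (word : String) : Prop :=
  word.toList.all (fun c => keyboard_matrix.any (fun row => row.contains (String.mk [c]))) = true
instance (keyboard_matrix : List (List String)) (start_position : Int × Int) (word : String) : Decidable (Pre_calculate_distances_with_wraparound keyboard_matrix start_position word) := by unfold Pre_calculate_distances_with_wraparound; infer_instance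

def pvWitness_calculate_distances_with_wraparound : List (List String) × (Int × Int) × String :=
  ([["a", "b"], ["c", "d"]], (0, 0), "ba")

def Spec_calculate_distances_with_wraparound (keyboard_matrix : List (List String)) (start_position : Int × Int) (word : String) (out : List (Int × Int)) : Prop := out = calculate_distances_with_wraparound_alt keyboard_matrix start_position word
instance (keyboard_matrix : List (List String)) (start_position : Int × Int) (word : String) (out : List (Int × Int)) : Decidable (Spec_calculate_distances_with_wraparound keyboard_matrix start_position word out) := by unfold Spec_calculate_distances_with_wraparound; infer_instance

-- ===== CLAIM (what is proved, stated in full; the proofs are below) =====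
def Claim_equal_calculate_distances_with_wraparound : Prop := ∀ (keyboard_matrix : List (List String)) (start_position : Int × Int) (word : String), Dom_calculate_distances_with_wraparound keyboard_matrix start_position word → Pre_calculate_distances_with_wraparound keyboard_matrix start_position word → Spec_calculate_distances_with_wraparound keyboard_matrix start_position word (calculate_distances_with_wraparound keyboard_matrix start_position word)

-- ===== LEMMAS AND PROOFS =====


-- the matrix's cells, flattened in traversal order, with their positions
def pvCells (mat : List (List String)) : List (String × (Int × Int)) :=
  (PySem.List.enumerate mat).flatMap (fun p => (PySem.List.enumerate p.2).map (fun q => (q.2, (p.1, q.1))))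

-- A's nested dict-building fold is a flat insert fold over the cells
theorem pvBuild_eq (L : List (Int × List String)) (d : PySem.Dict String (Int × Int)) :
    L.foldl (fun d p => (PySem.List.enumerate p.2).foldl (fun d q => d.insert q.2 (p.1, q.1)) d) d
    = (L.flatMap (fun p => (PySem.List.enumerate p.2).map (fun q => (q.2, (p.1, q.1))))).foldl (fun d p => d.insert p.1 p.2) d := by
  induction L generalizing d with
  | nil => rfl
  | cons a l ih => simp [List.flatMap_cons, List.foldl_append, List.foldl_map, ih]

-- B's nested last-match scan is a flat last-match fold over the cells
theorem pvScan_eq (L : List (Int × List String)) (s : String) (acc : Option (Int × Int)) :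
    L.foldl (fun acc p => (PySem.List.enumerate p.2).foldl (fun acc q => if q.2 = s then some (p.1, q.1) else acc) acc) acc
    = (L.flatMap (fun p => (PySem.List.enumerate p.2).map (fun q => (q.2, (p.1, q.1))))).foldl (fun acc p => if p.1 = s then some p.2 else acc) acc := by
  induction L generalizing acc with
  | nil => rfl
  | cons a l ih => simp [List.flatMap_cons, List.foldl_append, List.foldl_map, ih]

theorem pvGetFold (l : List (String × (Int × Int))) (d : PySem.Dict String (Int × Int)) (s : String) :
    (l.foldl (fun d p => d.insert p.1 p.2) d).get? s
    = l.foldl (fun acc p => if p.1 = s then some p.2 else acc) (d.get? s) := by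
  induction l generalizing d with
  | nil => rfl
  | cons a l ih =>
    rw [List.foldl_cons, List.foldl_cons, ih, PySem.Dict.get?_insert]
    congr 1
    by_cases h : a.1 = s
    · simp [h]
    · have h' : ¬s = a.1 := fun hh => h hh.symm
      simp [h, h']

-- A's dict lookup = B's scan, both as a flat fold over the cells
theorem pvLookup_eq (mat : List (List String)) (s : String) :
    ((PySem.List.enumerate mat).foldl (fun d p => (PySem.List.enumerate p.2).foldl (fun d q => d.insert q.2 (p.1, q.1)) d) PySem.Dict.empty).get? s
    = (pvCells mat).foldl (fun acc p => if p.1 = s then some p.2 else acc) none := by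
  rw [pvBuild_eq, pvGetFold]
  rfl

-- dict built by repeated insert: lookup = last-match scan
-- B's nested scan, phrased over the cells
theorem pvFound_eq (mat : List (List String)) (s : String) :
    (PySem.List.enumerate mat).foldl (fun acc p => (PySem.List.enumerate p.2).foldl (fun acc q => if q.2 = s then some (p.1, q.1) else acc) acc) none
    = (pvCells mat).foldl (fun acc p => if p.1 = s then some p.2 else acc) none := by
  rw [pvScan_eq]
  rfl

-- a successful last-match scan starting from none found a member
theorem pvFold_some_mem (l : List (String × (Int × Int))) (s : String) :
    ∀ (acc : Option (Int × Int)) (v : Int × Int),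
      l.foldl (fun acc p => if p.1 = s then some p.2 else acc) acc = some v →
      (s, v) ∈ l ∨ acc = some v := by
  induction l with
  | nil => exact fun acc v h => Or.inr h
  | cons a l ih =>
    intro acc v h
    rw [List.foldl_cons] at h
    rcases ih _ v h with hm | hacc
    · exact Or.inl (List.mem_cons_of_mem _ hm)
    · by_cases hs : a.1 = s
      · rw [if_pos hs] at hacc
        obtain rfl : a.2 = v := Option.some_inj.mp hacc
        exact Or.inl (by rw [← hs]; exact List.mem_cons_self)
      · rw [if_neg hs] at hacc
        exact Or.inr hacc

-- every cell's recorded position is a genuine in-range position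
theorem pvMem_cells {mat : List (List String)} {p : String × (Int × Int)} (h : p ∈ pvCells mat) :
    ∃ row : List String, 0 ≤ p.2.1 ∧ p.2.1 < (mat.length : Int) ∧
      mat[p.2.1.toNat]? = some row ∧ 0 ≤ p.2.2 ∧ p.2.2 < (row.length : Int) := by
  simp only [pvCells, List.mem_flatMap, List.mem_map] at h
  obtain ⟨q, hq, r, hr, rfl⟩ := h
  rw [PySem.List.mem_enumerate_iff] at hq
  obtain ⟨k, hk, rfl⟩ := hq
  rw [PySem.List.mem_enumerate_iff] at hr
  obtain ⟨j, hj, rfl⟩ := hr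
  refine ⟨mat[k], ?_, ?_, ?_, ?_, ?_⟩ <;>
    simp [hk, hj]

-- Python's a % b is the identity on in-range nonnegative a
theorem pvMod_self {a b : Int} (h0 : 0 ≤ a) (h1 : a < b) : PySem.Int.mod a b = a := by
  rw [PySem.Int.mod_eq_emod_of_pos (lt_of_le_of_lt h0 h1)]
  exact Int.emod_eq_of_lt h0 h1

-- ===== VERDICT (by name: the statement is the Claim_ definition above) =====
theorem calculate_distances_with_wraparound_spec : Claim_equal_calculate_distances_with_wraparound := by
  intro mat sp w _ _
  unfold Spec_calculate_distances_with_wraparound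
  simp only [calculate_distances_with_wraparound, calculate_distances_with_wraparound_alt]
  refine congrArg Prod.snd (PySem.List.foldl_congr_mem _ _ _ _ ?_)
  intro st ch _
  rw [pvLookup_eq, pvFound_eq]
  cases hF : (pvCells mat).foldl (fun acc p => if p.1 = String.mk [ch] then some p.2 else acc) none with
  | none => rfl
  | some np =>
    have hmem : (String.mk [ch], np) ∈ pvCells mat := by
      rcases pvFold_some_mem _ _ none np hF with h | h
      · exact h
      · exact absurd h (by simp)
    obtain ⟨row, h0, h1, hrow, h2, h3⟩ := pvMem_cells hmem
    have hwr : PySem.Int.mod np.1 ((mat.length : Int)) = np.1 := pvMod_self h0 h1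
    have hget : PySem.List.pyGet? mat np.1 = some row := by
      rw [← Int.toNat_of_nonneg h0, PySem.List.pyGet?_natCast]
      exact hrow
    simp [hwr, hget, pvMod_self h2 h3, min_self]
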